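-- pv_equiv track=rewrite | github.com/wblumberg/ModelDataStore | src/EnsDataStore/pipelines/postprocess_ensemble.py | _choose_run_accumulation_name
-- ===== SOURCE A (Python) =====
-- def _choose_run_accumulation_name(candidates: dict[str, str]) -> str | None:
-- 	for name, var_type in candidates.items():
-- 		if var_type == "accum":
-- 			return name
--
-- 	weighted: list[tuple[int, str]] = []
-- 	for name, var_type in candidates.items():
-- 		if var_type.startswith("accum") and var_type != "accum_1h":
-- 			weighted.append((_accum_hours(var_type), name))
-- 	if not weighted:
-- 		return None
-- 	weighted.sort(reverse=True)
-- 	return weighted[0][1]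
--
-- def _accum_hours(var_type: str) -> int:
-- 	if var_type == "accum":
-- 		return 0
-- 	suffix = var_type.split("_", maxsplit=1)[1] if "_" in var_type else ""
-- 	if suffix.endswith("h"):
-- 		suffix = suffix[:-1]
-- 	try:
-- 		return int(suffix)
-- 	except ValueError:
-- 		return 0
-- ===== SOURCE B (Python) =====
-- def _choose_run_accumulation_name(candidates: dict[str, str]) -> str | None:
-- 	# One pass: return immediately at the first exact "accum"; otherwise keep the
-- 	# running best (hours, name) tuple, replacing it only on a strictly greater tuple.
-- 	best: tuple[int, str] | None = None
-- 	for name, var_type in candidates.items():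
-- 		if var_type == "accum":
-- 			return name
-- 		if var_type.startswith("accum") and var_type != "accum_1h":
-- 			key = (_accum_hours(var_type), name)
-- 			if best is None or key > best:
-- 				best = key
-- 	return best[1] if best is not None else None
--
-- def _accum_hours(var_type: str) -> int:
-- 	if var_type == "accum":
-- 		return 0
-- 	suffix = var_type.split("_", maxsplit=1)[1] if "_" in var_type else ""
-- 	if suffix.endswith("h"):
-- 		suffix = suffix[:-1]
-- 	try:
-- 		return int(suffix)
-- 	except ValueError:
-- 		return 0
-- ===== Notes on version B (the rewrite author's own statement) =====
-- stated objective: simpler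
-- what changed: Replaced A's two full passes plus a descending sort with a single pass that returns at the first exact 'accum' and otherwise tracks the running maximum (hours, name) tuple, so the sort and the intermediate list disappear.
import Mathlib
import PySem

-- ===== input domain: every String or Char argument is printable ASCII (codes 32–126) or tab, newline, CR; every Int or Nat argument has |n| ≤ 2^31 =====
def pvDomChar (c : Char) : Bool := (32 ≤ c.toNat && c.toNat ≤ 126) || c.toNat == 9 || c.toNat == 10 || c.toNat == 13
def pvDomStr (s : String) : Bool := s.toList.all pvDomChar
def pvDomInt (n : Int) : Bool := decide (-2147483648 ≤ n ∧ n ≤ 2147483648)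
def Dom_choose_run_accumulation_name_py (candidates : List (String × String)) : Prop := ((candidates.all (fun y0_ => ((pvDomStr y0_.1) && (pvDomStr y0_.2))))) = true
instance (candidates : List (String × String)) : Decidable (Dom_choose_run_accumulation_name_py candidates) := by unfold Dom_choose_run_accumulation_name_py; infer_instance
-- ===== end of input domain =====

-- B fuses A's two passes and the descending sort into one pass keeping a running maximum; return value only, no mutation.

-- ===== PORT A =====
-- shared helper _accum_hours (identical in A and B)
def accum_hours_py (var_type : String) : Int :=
  if var_type == "accum" then 0
  else
    -- var_type.split("_", maxsplit=1)[1]: when "_" is in var_type the split has ≥ 2 parts, so the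
    -- index-1 access cannot raise; `getD` is exact there.
    let suffix := if PySem.Str.isIn "_" var_type then
        (((PySem.Str.splitMax? var_type "_" 1).getD []).getD 1 "")
      else ""
    let suffix := if PySem.Str.endswith suffix "h" then PySem.Str.slice suffix none (some (-1)) else suffix
    (PySem.Int.ofStr? suffix).getD 0   -- try int(suffix) except ValueError: 0

def choose_run_accumulation_name_py (candidates : List (String × String)) : Option String :=
  let items := (PySem.Dict.ofList candidates).items
  match items.find? (fun p => p.2 == "accum") with      -- first loop with early return
  | some p => some p.1
  | none =>
    let weighted := items.foldl (fun acc p =>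
      if PySem.Str.startswith p.2 "accum" && p.2 != "accum_1h"
      then acc ++ [(accum_hours_py p.2, p.1)] else acc) []
    if weighted.isEmpty then none
    else
      let w := PySem.List.sorted2 weighted (fun p => p.1) (fun p => p.2) true
      (PySem.List.pyGet? w 0).map (fun p => p.2)        -- weighted[0][1]; w is nonempty

-- ===== PORT B =====
-- Python tuple comparison b < k on (int, str)
def pvTupLt (b k : Int × String) : Bool :=
  decide (b.1 < k.1) || (!decide (k.1 < b.1) && decide (b.2 < k.2))

def pvGoB : List (String × String) → Option (Int × String) → Option String
  | [], best => best.map (fun p => p.2)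
  | (name, vt) :: rest, best =>
    if vt == "accum" then some name
    else if PySem.Str.startswith vt "accum" && vt != "accum_1h" then
      let key := (accum_hours_py vt, name)
      pvGoB rest (match best with
        | none => some key
        | some b => if pvTupLt b key then some key else some b)
    else pvGoB rest best

def choose_run_accumulation_name_py_alt (candidates : List (String × String)) : Option String :=
  pvGoB (PySem.Dict.ofList candidates).items none

-- ===== PRECONDITION & SPEC =====
def Spec_choose_run_accumulation_name_py (candidates : List (String × String)) (out : Option String) : Prop := out = choose_run_accumulation_name_py_alt candidates
instance (candidates : List (String × String)) (out : Option String) : Decidable (Spec_choose_run_accumulation_name_py candidates out) := by unfold Spec_choose_run_accumulation_name_py; infer_instance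

-- ===== CLAIM (what is proved, stated in full; the proofs are below) =====
def Claim_equal_choose_run_accumulation_name_py : Prop := ∀ (candidates : List (String × String)), Dom_choose_run_accumulation_name_py candidates → Spec_choose_run_accumulation_name_py candidates (choose_run_accumulation_name_py candidates)

-- ===== LEMMAS AND PROOFS =====

-- the filter/map condition and key of A's second loop
def pvCond (p : String × String) : Bool := PySem.Str.startswith p.2 "accum" && p.2 != "accum_1h"
def pvKey (p : String × String) : Int × String := (accum_hours_py p.2, p.1)

-- B's accumulator step, on Option
def pvBStep (best : Option (Int × String)) (k : Int × String) : Option (Int × String) :=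
  match best with
  | none => some k
  | some b => if pvTupLt b k then some k else some b

-- plain max step used to characterise the head of the descending insertion sort
def pvMStep (b k : Int × String) : Int × String := if pvTupLt b k then k else b

lemma pvGoB_accum (L : List (String × String)) (p : String × String)
    (h : L.find? (fun q => q.2 == "accum") = some p) :
    ∀ best, pvGoB L best = some p.1 := by
  induction L with
  | nil => simp at h
  | cons q t ih =>
    intro best
    rcases q with ⟨name, vt⟩
    by_cases hv : vt == "accum"
    · simp [List.find?, hv] at h
      subst h
      simp [pvGoB, hv]
    · simp [List.find?, hv] at h
      simp [pvGoB, hv]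
      split_ifs <;> exact ih h _

lemma pvGoB_no_accum (L : List (String × String))
    (h : ∀ q ∈ L, ¬ (q.2 == "accum") = true) :
    ∀ best, pvGoB L best = (((L.filter pvCond).map pvKey).foldl pvBStep best).map (fun p => p.2) := by
  induction L with
  | nil => intro best; simp [pvGoB]
  | cons q t ih =>
    intro best
    rcases q with ⟨name, vt⟩
    have hv : (vt == "accum") = false :=
      Bool.eq_false_iff.mpr (fun hc => h (name, vt) List.mem_cons_self hc)
    have ht : ∀ q ∈ t, ¬ (q.2 == "accum") = true := fun q hq => h q (List.mem_cons_of_mem _ hq)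
    by_cases hc : (PySem.Str.startswith vt "accum" && vt != "accum_1h") = true
    · simp only [pvGoB, hv, Bool.false_eq_true, if_false, hc, if_true]
      rw [ih ht]
      rw [List.filter_cons, if_pos (show pvCond (name, vt) = true from hc)]
      rfl
    · have hcf : (PySem.Str.startswith vt "accum" && vt != "accum_1h") = false :=
        Bool.eq_false_iff.mpr hc
      simp only [pvGoB, hv, Bool.false_eq_true, if_false, hcf]
      rw [List.filter_cons, if_neg (show ¬ pvCond (name, vt) = true from hc)]
      exact ih ht best

lemma pvBStep_some (w : List (Int × String)) :
    ∀ b, w.foldl pvBStep (some b) = some (w.foldl pvMStep b) := by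
  induction w with
  | nil => intro b; rfl
  | cons k t ih =>
    intro b
    simp only [List.foldl]
    rw [show pvBStep (some b) k = some (pvMStep b k) by by_cases hc : pvTupLt b k <;> simp [pvBStep, pvMStep, hc]]
    exact ih _

-- head of the descending stable insertion sort = left fold of the strict max step
lemma pvInsertBy_head (before : Int × String → Int × String → Bool)
    (x h : Int × String) (t : List (Int × String)) :
    PySem.List.insertBy before x (h :: t) = if before x h then x :: h :: t
      else h :: PySem.List.insertBy before x t := by
  simp [PySem.List.insertBy]

lemma pvSortHead (before : Int × String → Int × String → Bool)
    (hb : ∀ a b, before a b = pvTupLt b a) (w : List (Int × String)) :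
    ∀ h t, (w.foldl (fun acc x => PySem.List.insertBy before x acc) (h :: t)).head? =
      some (w.foldl pvMStep h) := by
  induction w with
  | nil => intro h t; rfl
  | cons x rest ih =>
    intro h t
    simp only [List.foldl]
    rw [pvInsertBy_head]
    by_cases hx : before x h
    · rw [if_pos hx]
      rw [ih x (h :: t)]
      have : pvMStep h x = x := by unfold pvMStep; rw [← hb x h, hx]; rfl
      rw [this]
    · rw [if_neg hx]
      rw [ih h _]
      have : pvMStep h x = h := by
        unfold pvMStep
        rw [← hb x h]
        simp [hx]
      rw [this]

-- A's body, written out on the items list, equals B's loop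
lemma pvMainA (L : List (String × String)) :
    (match L.find? (fun p => p.2 == "accum") with
      | some p => some p.1
      | none =>
        if (L.foldl (fun acc p =>
            if PySem.Str.startswith p.2 "accum" && p.2 != "accum_1h"
            then acc ++ [(accum_hours_py p.2, p.1)] else acc) []).isEmpty then none
        else
          (PySem.List.pyGet? (PySem.List.sorted2
            (L.foldl (fun acc p =>
              if PySem.Str.startswith p.2 "accum" && p.2 != "accum_1h"
              then acc ++ [(accum_hours_py p.2, p.1)] else acc) [])
            (fun p => p.1) (fun p => p.2) true) 0).map (fun p => p.2))
    = pvGoB L none := by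
  have hw : L.foldl (fun acc p =>
      if PySem.Str.startswith p.2 "accum" && p.2 != "accum_1h"
      then acc ++ [(accum_hours_py p.2, p.1)] else acc) []
      = (L.filter pvCond).map pvKey := by
    simpa [pvCond, pvKey] using PySem.List.foldl_append_if pvCond pvKey L []
  cases hf : L.find? (fun p => p.2 == "accum") with
  | some p =>
    rw [pvGoB_accum L p hf]
  | none =>
    have hno : ∀ q ∈ L, ¬ (q.2 == "accum") = true := fun q hq =>
      List.find?_eq_none.mp hf q hq
    rw [pvGoB_no_accum L hno none, hw]
    cases hwl : (L.filter pvCond).map pvKey with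
    | nil => rfl
    | cons k rest =>
      simp only [List.isEmpty_cons, Bool.false_eq_true, if_false]
      rw [List.foldl_cons, show pvBStep none k = some k from rfl, pvBStep_some]
      have hsort : (PySem.List.sorted2 (k :: rest) (fun p => p.1) (fun p => p.2) true).head? =
          some (rest.foldl pvMStep k) := by
        show ((k :: rest).foldl (fun acc x =>
          PySem.List.insertBy (fun a b =>
            (decide (b.1 < a.1) || (!decide (a.1 < b.1) && decide (b.2 < a.2)))) x acc) []).head? = _
        rw [List.foldl_cons]
        exact pvSortHead _ (fun a b => rfl) rest k []
      cases hs : PySem.List.sorted2 (k :: rest) (fun p => p.1) (fun p => p.2) true with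
      | nil => rw [hs] at hsort; simp at hsort
      | cons m t =>
        rw [hs] at hsort
        simp only [List.head?] at hsort
        rw [PySem.List.pyGet?_zero]
        simp only [List.getElem?_cons_zero, Option.map_some]
        injection hsort with hm
        rw [hm]

-- ===== VERDICT (by name: the statement is the Claim_ definition above) =====
theorem choose_run_accumulation_name_py_spec : Claim_equal_choose_run_accumulation_name_py := by
  intro candidates _
  show choose_run_accumulation_name_py candidates = choose_run_accumulation_name_py_alt candidates
  unfold choose_run_accumulation_name_py choose_run_accumulation_name_py_alt
  exact pvMainA (PySem.Dict.ofList candidates).items
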